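-- pv_equiv track=rewrite | github.com/Drakonkinst/AdventOfCode | 2022/Day17/puzzle2.py | getLastXRows
-- ===== SOURCE A (Python) =====
-- def rowToNumber(row):
--     total = 0
--     exp = 0
--     for x in row:
--         if x == 1:
--             total += 2 ** exp
--         exp += 1
--     return total
--
-- def getLastXRows(board, x):
--     lastXRows = []
--     for i in range(x):
--         index = len(board) - 1 - i
--         if index < 0:
--             lastXRows.append(0)
--         else:
--             lastXRows.append(rowToNumber(board[index]))
--     return lastXRows
-- ===== SOURCE B (Python) =====
-- def rowToNumber_alt(row):
--     total = 0
--     for v in reversed(row):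
--         total = total * 2 + (1 if v == 1 else 0)
--     return total
--
--
-- def getLastXRows(board, x):
--     vals = [rowToNumber_alt(row) for row in reversed(board)]
--     return (vals + [0] * max(x - len(vals), 0))[:max(x, 0)]
-- ===== Notes on version B (the rewrite author's own statement) =====
-- stated objective: idiomatic
-- what changed: rowToNumber's running 2**exp accumulator is replaced by Horner's rule over the reversed row, and the index-arithmetic loop over range(x) is replaced by mapping over the reversed board then padding with zeros and truncating.
import Mathlib
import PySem

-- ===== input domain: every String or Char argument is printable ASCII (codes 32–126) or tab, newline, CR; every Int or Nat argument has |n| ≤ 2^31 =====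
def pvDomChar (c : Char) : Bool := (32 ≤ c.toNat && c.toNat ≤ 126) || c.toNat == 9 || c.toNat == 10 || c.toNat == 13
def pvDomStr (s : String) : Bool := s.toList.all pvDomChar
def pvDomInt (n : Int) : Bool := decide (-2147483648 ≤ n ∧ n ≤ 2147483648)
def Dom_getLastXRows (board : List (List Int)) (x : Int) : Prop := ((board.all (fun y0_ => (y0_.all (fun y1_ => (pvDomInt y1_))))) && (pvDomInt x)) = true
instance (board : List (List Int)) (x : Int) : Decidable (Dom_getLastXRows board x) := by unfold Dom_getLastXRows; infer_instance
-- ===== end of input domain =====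

-- B replaces A's index arithmetic and 2**exp sums by: Horner's rule over the reversed row,
-- and reverse-map-pad-truncate instead of the index loop (objective: simpler/idiomatic; same cost).

-- ===== PORT A =====
-- rowToNumber: total = 0; exp = 0; for x in row: if x == 1: total += 2**exp; exp += 1
def rowToNumber (row : List Int) : Int :=
  (row.foldl (fun (st : Int × Nat) v =>
    (if v == 1 then st.1 + 2 ^ st.2 else st.1, st.2 + 1)) (0, 0)).1

-- the index is always < board.length when ≥ 0, so the pyGetD default [] is never used
def getLastXRows (board : List (List Int)) (x : Int) : List Int :=
  (PySem.List.pyRange 0 x 1).foldl (fun acc i =>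
    let index : Int := (board.length : Int) - 1 - i
    if index < 0 then acc ++ [0]
    else acc ++ [rowToNumber (PySem.List.pyGetD board index [])]) []

-- ===== PORT B =====
def rowToNumber_alt (row : List Int) : Int :=
  row.reverse.foldl (fun total v => total * 2 + (if v == 1 then 1 else 0)) 0

def getLastXRows_alt (board : List (List Int)) (x : Int) : List Int :=
  let vals := board.reverse.map rowToNumber_alt
  ((vals ++ List.replicate (max (x - (vals.length : Int)) 0).toNat 0).take (max x 0).toNat)

-- ===== PRECONDITION & SPEC =====
def Spec_getLastXRows (board : List (List Int)) (x : Int) (out : List Int) : Prop := out = getLastXRows_alt board x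
instance (board : List (List Int)) (x : Int) (out : List Int) : Decidable (Spec_getLastXRows board x out) := by unfold Spec_getLastXRows; infer_instance

-- ===== CLAIM (what is proved, stated in full; the proofs are below) =====
def Claim_equal_getLastXRows : Prop := ∀ (board : List (List Int)) (x : Int), Dom_getLastXRows board x → Spec_getLastXRows board x (getLastXRows board x)

-- ===== LEMMAS AND PROOFS =====

-- Horner on a reversed cons: new element is the least-significant bit
theorem rowToNumber_alt_cons (v : Int) (r : List Int) :
    rowToNumber_alt (v :: r) = 2 * rowToNumber_alt r + (if v == 1 then 1 else 0) := by
  simp [rowToNumber_alt, List.foldl_append]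
  ring

-- A's fold with generalized state equals base + 2^exp * Horner value
theorem rowToNumber_fold_eq (r : List Int) : ∀ (t : Int) (e : Nat),
    (r.foldl (fun (st : Int × Nat) v =>
      (if v == 1 then st.1 + 2 ^ st.2 else st.1, st.2 + 1)) (t, e)).1
    = t + 2 ^ e * rowToNumber_alt r := by
  induction r with
  | nil => intro t e; simp [rowToNumber_alt]
  | cons v r ih =>
    intro t e
    simp only [List.foldl_cons, rowToNumber_alt_cons]
    rw [ih]
    split <;> ring_nf

theorem rowToNumber_eq (r : List Int) : rowToNumber r = rowToNumber_alt r := by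
  unfold rowToNumber
  simpa using rowToNumber_fold_eq r 0 0

theorem getLastXRows_eq_map (board : List (List Int)) (x : Int) :
    getLastXRows board x = (PySem.List.pyRange 0 x 1).map (fun i =>
      if (board.length : Int) - 1 - i < 0 then 0
      else rowToNumber (PySem.List.pyGetD board ((board.length : Int) - 1 - i) [])) := by
  unfold getLastXRows
  have h : (fun (acc : List Int) (i : Int) =>
      let index : Int := (board.length : Int) - 1 - i
      if index < 0 then acc ++ [0]
      else acc ++ [rowToNumber (PySem.List.pyGetD board index [])])
      = fun acc i => acc ++ [if (board.length : Int) - 1 - i < 0 then 0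
        else rowToNumber (PySem.List.pyGetD board ((board.length : Int) - 1 - i) [])] := by
    funext acc i
    by_cases h : (board.length : Int) - 1 - i < 0 <;> simp [h]
  rw [h, PySem.List.foldl_append_singleton_eq_map]
  simp

-- ===== VERDICT (by name: the statement is the Claim_ definition above) =====
theorem getLastXRows_spec : Claim_equal_getLastXRows := by
  intro board x _
  unfold Spec_getLastXRows getLastXRows_alt
  rw [getLastXRows_eq_map, PySem.List.pyRange_one]
  apply List.ext_getElem
  · simp [List.length_take, List.length_replicate]
    omega
  · intro i h1 h2
    simp only [List.getElem_map, List.getElem_range, List.getElem_take]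
    simp only [List.length_map, List.length_range] at h1
    have hi : (i : Int) < x := by omega
    by_cases hil : i < board.length
    · have hge : ¬ ((board.length : Int) - 1 - (0 + (i : Int)) < 0) := by omega
      rw [if_neg hge]
      have hidx : (board.length : Int) - 1 - (0 + (i : Int)) = ((board.length - 1 - i : Nat) : Int) := by omega
      rw [hidx, PySem.List.pyGetD_natCast]
      have hlt : board.length - 1 - i < board.length := by omega
      rw [List.getD_eq_getElem board [] hlt]
      rw [List.getElem_append_left (by simpa using hil)]
      rw [List.getElem_map]
      rw [rowToNumber_eq]
      congr 1
      rw [List.getElem_reverse]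
    · have hlt0 : (board.length : Int) - 1 - (0 + (i : Int)) < 0 := by omega
      rw [if_pos hlt0]
      rw [List.getElem_append_right (by simpa using hil)]
      simp [List.getElem_replicate]
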